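-- pv_equiv track=rewrite | github.com/TheCheese42/microstation | microstation/utils.py | is_valid_fqbn
-- ===== SOURCE A (Python) =====
-- def is_valid_fqbn(fqbn: str) -> bool:
--     splits = fqbn.split(":")
--     if len(splits) != 3:
--         return False
--     for split in splits:
--         if not split:
--             return False
--     return True
-- ===== SOURCE B (Python) =====
-- def is_valid_fqbn(fqbn: str) -> bool:
--     colons = 0
--     seg_len = 0
--     for ch in fqbn:
--         if ch == ":":
--             if seg_len == 0:
--                 return False
--             colons += 1
--             seg_len = 0
--         else:
--             seg_len += 1
--     return colons == 2 and seg_len > 0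
-- ===== Notes on version B (the rewrite author's own statement) =====
-- stated objective: alternative
-- what changed: Replaces split-into-a-list-then-check with a single character scan that counts colons and tracks the current segment length, returning early on an empty segment and never materialising the list of parts.
import Mathlib
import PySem

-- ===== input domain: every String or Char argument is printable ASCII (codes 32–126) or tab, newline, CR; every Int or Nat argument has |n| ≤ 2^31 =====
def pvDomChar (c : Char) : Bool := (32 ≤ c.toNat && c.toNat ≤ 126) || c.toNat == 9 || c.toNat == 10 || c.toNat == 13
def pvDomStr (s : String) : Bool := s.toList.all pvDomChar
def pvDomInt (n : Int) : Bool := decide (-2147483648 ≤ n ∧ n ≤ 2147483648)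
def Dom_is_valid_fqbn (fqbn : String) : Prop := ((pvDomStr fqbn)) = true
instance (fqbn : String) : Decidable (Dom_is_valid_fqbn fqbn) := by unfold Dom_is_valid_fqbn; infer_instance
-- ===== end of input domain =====

-- B replaces split-then-check with a single character scan (colon count + current segment length); same O(n) cost, no intermediate list.

-- ===== PORT A =====
-- A's loop "for split in splits: if not split: return False / return True"
def pvLoopA : List String → Bool
  | [] => true
  | s :: rest => if s = "" then false else pvLoopA rest

def is_valid_fqbn (fqbn : String) : Bool :=
  let splits := (PySem.Str.split? fqbn ":").getD []   -- sep ":" ≠ "", so split? is always some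
  if splits.length ≠ 3 then false
  else pvLoopA splits

-- ===== PORT B =====
-- B's loop: state (colons, seg_len); early False on a colon ending an empty segment
def pvScanB : List Char → Nat → Nat → Bool
  | [], colons, segLen => colons == 2 && decide (segLen > 0)
  | c :: rest, colons, segLen =>
    if c = ':' then
      if segLen == 0 then false else pvScanB rest (colons + 1) 0
    else pvScanB rest colons (segLen + 1)

def is_valid_fqbn_alt (fqbn : String) : Bool :=
  pvScanB fqbn.toList 0 0

-- ===== PRECONDITION & SPEC =====
def Spec_is_valid_fqbn (fqbn : String) (out : Bool) : Prop := out = is_valid_fqbn_alt fqbn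
instance (fqbn : String) (out : Bool) : Decidable (Spec_is_valid_fqbn fqbn out) := by unfold Spec_is_valid_fqbn; infer_instance

-- ===== CLAIM (what is proved, stated in full; the proofs are below) =====
def Claim_equal_is_valid_fqbn : Prop := ∀ (fqbn : String), Dom_is_valid_fqbn fqbn → Spec_is_valid_fqbn fqbn (is_valid_fqbn fqbn)

-- ===== LEMMAS AND PROOFS =====

-- structural (fuel-free) form of splitting on ':'
def pvSplitColon : List Char → List Char → List (List Char)
  | pre, [] => [pre]
  | pre, c :: rest => if c = ':' then pre :: pvSplitColon [] rest else pvSplitColon (pre ++ [c]) rest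

theorem pvGo_eq_splitColon : ∀ (fuel : Nat) (l cur : List Char) (acc : List (List Char)), l.length < fuel →
    PySem.Chars.splitOn.go [':'] fuel l cur acc = acc.reverse ++ pvSplitColon cur.reverse l := by
  intro fuel
  induction fuel with
  | zero => intro l cur acc h; omega
  | succ n ih =>
    intro l cur acc h
    cases l with
    | nil =>
      rw [show PySem.Chars.splitOn.go [':'] (n+1) [] cur acc = (cur.reverse :: acc).reverse from rfl]
      simp [pvSplitColon]
    | cons c rest =>
      by_cases hc : c = ':'
      · subst hc
        have hp : List.isPrefixOf [':'] (':' :: rest) = true := by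
          simp [List.isPrefixOf]
        rw [show PySem.Chars.splitOn.go [':'] (n+1) (':' :: rest) cur acc =
            (if List.isPrefixOf [':'] (':' :: rest) then
              PySem.Chars.splitOn.go [':'] n (List.drop 1 (':' :: rest)) [] (cur.reverse :: acc)
            else PySem.Chars.splitOn.go [':'] n rest (':' :: cur) acc) from rfl]
        rw [if_pos hp]
        simp only [List.drop_succ_cons, List.drop_zero]
        rw [ih rest [] (cur.reverse :: acc) (by simpa using Nat.lt_of_succ_lt_succ h)]
        simp [pvSplitColon]
      · have hp : List.isPrefixOf [':'] (c :: rest) = true → False := by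
          simp [List.isPrefixOf]; intro h'; exact hc h'.symm
        rw [show PySem.Chars.splitOn.go [':'] (n+1) (c :: rest) cur acc =
            (if List.isPrefixOf [':'] (c :: rest) then
              PySem.Chars.splitOn.go [':'] n (List.drop 1 (c :: rest)) [] (cur.reverse :: acc)
            else PySem.Chars.splitOn.go [':'] n rest (c :: cur) acc) from rfl]
        rw [if_neg (by intro hh; exact hp hh)]
        rw [ih rest (c :: cur) acc (by simpa using Nat.lt_of_succ_lt_succ h)]
        simp [pvSplitColon, hc]

theorem pvSplitOn_eq (s : List Char) : PySem.Chars.splitOn s [':'] = pvSplitColon [] s := by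
  rw [PySem.Chars.splitOn, pvGo_eq_splitColon (s.length + 1) s [] [] (Nat.lt_succ_self _)]
  simp

-- B's scan ↔ properties of the structural split
theorem pvScan_iff : ∀ (l pre : List Char) (colons : Nat),
    pvScanB l colons pre.length = true ↔
      ((∀ p ∈ pvSplitColon pre l, p ≠ []) ∧ colons + (pvSplitColon pre l).length = 3) := by
  intro l
  induction l with
  | nil =>
    intro pre colons
    simp [pvScanB, pvSplitColon, List.length_pos_iff]
    tauto
  | cons c rest ih =>
    intro pre colons
    by_cases hc : c = ':'
    · subst hc
      by_cases hpre : pre = []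
      · subst hpre
        simp [pvScanB, pvSplitColon]
      · have hlen : pre.length ≠ 0 := by simpa [List.length_eq_zero_iff] using hpre
        rw [show pvScanB (':' :: rest) colons pre.length = pvScanB rest (colons + 1) 0 by
          simp [pvScanB, hlen]]
        have := ih [] (colons + 1)
        simp only [List.length_nil] at this
        rw [this]
        simp [pvSplitColon, hpre]
        intro _
        omega
    · rw [show pvScanB (c :: rest) colons pre.length = pvScanB rest colons (pre.length + 1) by
        simp [pvScanB, hc]]
      have := ih (pre ++ [c]) colons
      simp only [List.length_append, List.length_singleton] at this
      rw [this]
      simp [pvSplitColon, hc]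

-- A's inner loop ↔ all parts nonempty
theorem pvLoopA_iff (parts : List (List Char)) :
    pvLoopA (parts.map String.ofList) = true ↔ ∀ p ∈ parts, p ≠ [] := by
  induction parts with
  | nil => simp [pvLoopA]
  | cons p rest ih =>
    by_cases hp : p = []
    · subst hp; simp [pvLoopA]
    · have : (String.ofList p = "") = False := by
        simp only [eq_iff_iff, iff_false]
        intro h
        have := congrArg String.toList h
        simp at this
        exact hp this
      simp [pvLoopA, this, ih, hp]

-- ===== VERDICT (by name: the statement is the Claim_ definition above) =====
theorem is_valid_fqbn_spec : Claim_equal_is_valid_fqbn := by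
  intro fqbn _
  unfold Spec_is_valid_fqbn is_valid_fqbn is_valid_fqbn_alt
  have hsplit : PySem.Str.split? fqbn ":" =
      some ((pvSplitColon [] fqbn.toList).map String.ofList) := by
    rw [PySem.Str.split?]
    simp only [PySem.Chars.split?]
    rw [show (String.toList ":") = [':'] from rfl, if_neg (by decide), pvSplitOn_eq]
    rfl
  rw [hsplit]
  simp only [Option.getD_some, List.length_map]
  have hB := pvScan_iff fqbn.toList [] 0
  simp only [List.length_nil, Nat.zero_add] at hB
  by_cases hlen : (pvSplitColon [] fqbn.toList).length = 3
  · rw [if_neg (by simpa using hlen)]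
    rcases hA : pvLoopA ((pvSplitColon [] fqbn.toList).map String.ofList) with _ | _
    · have hall : ¬ ∀ p ∈ pvSplitColon [] fqbn.toList, p ≠ [] := by
        rw [← pvLoopA_iff]; simp [hA]
      symm
      rw [← Bool.not_eq_true, hB]
      rintro ⟨h1, _⟩; exact hall h1
    · have hall : ∀ p ∈ pvSplitColon [] fqbn.toList, p ≠ [] := (pvLoopA_iff _).mp hA
      symm
      rw [hB]
      exact ⟨hall, hlen⟩
  · rw [if_pos (by simpa using hlen)]
    symm
    rw [← Bool.not_eq_true, hB]
    rintro ⟨_, h2⟩; exact hlen h2
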